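-- pv_equiv track=rewrite | github.com/sriram488/problems | makingAnagrams.py | makeAnagramS
-- ===== SOURCE A (Python) =====
-- from collections import Counter
--
-- def makeAnagramS(s1,s2):
--     c1 = Counter(s1)
--     c2 = Counter(s2)
--     deletions = 0
--     for char_code in range(ord('a'), ord('z') + 1):
--         char = chr(char_code)
--
--         # Get the frequency of the current character in both strings
--         freq1 = c1.get(char, 0)
--         freq2 = c2.get(char, 0)
--
--         # Add the absolute difference in frequencies to deletions
--         deletions += abs(freq1 - freq2)
--     return deletions
-- ===== SOURCE B (Python) =====
-- def makeAnagramS(s1, s2):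
--     t1 = sorted(c for c in s1 if 'a' <= c <= 'z')
--     t2 = sorted(c for c in s2 if 'a' <= c <= 'z')
--     i = j = deletions = 0
--     while i < len(t1) and j < len(t2):
--         if t1[i] == t2[j]:
--             i += 1
--             j += 1
--         elif t1[i] < t2[j]:
--             deletions += 1
--             i += 1
--         else:
--             deletions += 1
--             j += 1
--     return deletions + (len(t1) - i) + (len(t2) - j)
-- ===== Notes on version B (the rewrite author's own statement) =====
-- stated objective: alternative
-- what changed: Replaces the two Counter tables and the 26-character frequency-difference loop by filtering each string to a-z, sorting both, and counting mismatches in a single two-pointer merge walk.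
import Mathlib
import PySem

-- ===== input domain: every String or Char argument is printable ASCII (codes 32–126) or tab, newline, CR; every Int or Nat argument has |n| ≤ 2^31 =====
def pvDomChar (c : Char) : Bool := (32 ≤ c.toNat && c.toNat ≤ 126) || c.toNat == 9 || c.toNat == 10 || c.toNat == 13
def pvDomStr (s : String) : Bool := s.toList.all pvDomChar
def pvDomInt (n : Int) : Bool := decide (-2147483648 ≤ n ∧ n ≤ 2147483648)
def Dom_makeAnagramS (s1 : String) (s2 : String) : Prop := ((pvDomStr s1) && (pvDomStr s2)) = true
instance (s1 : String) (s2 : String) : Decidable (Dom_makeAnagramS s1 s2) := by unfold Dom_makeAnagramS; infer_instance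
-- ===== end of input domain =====

-- B replaces the two Counter tables and the 26-letter frequency-difference loop by
-- filter-to-a..z + sort + a two-pointer merge walk counting mismatches (alternative algorithm, same result).

-- ===== PORT A =====
def makeAnagramS (s1 : String) (s2 : String) : Int :=
  let c1 := PySem.Dict.counter s1.toList
  let c2 := PySem.Dict.counter s2.toList
  (PySem.List.pyRange 97 123 1).foldl
    (fun deletions charCode =>
      -- chr(char_code): exact here since 97 ≤ charCode ≤ 122 is always a valid code point
      let char := Char.ofNat charCode.toNat
      let freq1 := c1.getD char 0
      let freq2 := c2.getD char 0
      deletions + |freq1 - freq2|) 0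

-- ===== PORT B =====
-- [c for c in s if 'a' <= c <= 'z']
def azFilter (s : String) : List Char :=
  s.toList.filter (fun c => decide ('a' ≤ c ∧ c ≤ 'z'))

-- the while loop of Source B: two pointers over the two sorted lists, counting mismatches,
-- plus both leftover tails when one side is exhausted
def mergeDel : List Char → List Char → Int
  | [], t2 => (t2.length : Int)
  | x :: xs, [] => ((x :: xs).length : Int)
  | x :: xs, y :: ys =>
    if x = y then mergeDel xs ys
    else if x < y then 1 + mergeDel xs (y :: ys)
    else 1 + mergeDel (x :: xs) ys

def makeAnagramS_alt (s1 : String) (s2 : String) : Int :=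
  mergeDel (PySem.List.sorted (azFilter s1) (fun c => c) false)
           (PySem.List.sorted (azFilter s2) (fun c => c) false)

-- ===== PRECONDITION & SPEC =====
def Spec_makeAnagramS (s1 : String) (s2 : String) (out : Int) : Prop := out = makeAnagramS_alt s1 s2
instance (s1 : String) (s2 : String) (out : Int) : Decidable (Spec_makeAnagramS s1 s2 out) := by unfold Spec_makeAnagramS; infer_instance

-- ===== CLAIM (what is proved, stated in full; the proofs are below) =====
def Claim_equal_makeAnagramS : Prop := ∀ (s1 : String) (s2 : String), Dom_makeAnagramS s1 s2 → Spec_makeAnagramS s1 s2 (makeAnagramS s1 s2)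

-- ===== LEMMAS AND PROOFS =====

-- the common value both sides are reduced to: Σ_{i=97}^{122} |count_(l1)(chr i) - count_(l2)(chr i)|
def azSum (l1 l2 : List Char) : Int :=
  ((PySem.List.pyRange 97 123 1).map
    (fun i => |((l1.count (Char.ofNat i.toNat)) : Int) - ((l2.count (Char.ofNat i.toNat)) : Int)|)).sum

def inAZ (c : Char) : Prop := 97 ≤ c.toNat ∧ c.toNat ≤ 122

theorem char_toNat_ofNat (n : Nat) (h : n < 55296) : (Char.ofNat n).toNat = n := by
  have hv : n.isValidChar := Or.inl (by omega)
  rw [Char.toNat_ofNat, if_pos hv]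

theorem ofNat_eq_iff (i : Int) (h1 : 97 ≤ i) (h2 : i < 123) (c : Char) (hc : inAZ c) :
    Char.ofNat i.toNat = c ↔ i = (c.toNat : Int) := by
  obtain ⟨hc1, hc2⟩ := hc
  constructor
  · intro h
    have := congrArg Char.toNat h
    rw [char_toNat_ofNat i.toNat (by omega)] at this
    omega
  · intro h
    have : i.toNat = c.toNat := by omega
    rw [this, Char.ofNat_toNat]

theorem sum_map_shift (L : List Int) (y : Int) (f g : Int → Int)
    (h : ∀ i ∈ L, f i = g i + (if i = y then 1 else 0)) :
    (L.map f).sum = (L.map g).sum + (L.count y : Int) := by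
  induction L with
  | nil => simp
  | cons a L ih =>
    have ha := h a (by simp)
    have ih' := ih (fun i hi => h i (by simp [hi]))
    simp only [List.map_cons, List.sum_cons, List.count_cons, ih', ha]
    by_cases hay : a = y <;> simp [hay, beq_iff_eq] <;> ring

theorem count_range_eq_one (c : Char) (hc : inAZ c) :
    ((PySem.List.pyRange 97 123 1).count ((c.toNat : Int)) : Int) = 1 := by
  obtain ⟨hc1, hc2⟩ := hc
  have hm : (c.toNat : Int) ∈ PySem.List.pyRange 97 123 1 := by
    rw [PySem.List.mem_pyRange_one]; omega
  rw [List.count_eq_one_of_mem (PySem.List.nodup_pyRange_one 97 123) hm]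
  simp

theorem count_cons_indicator (a : Char) (l : List Char) (i : Int) (hi1 : 97 ≤ i) (hi2 : i < 123)
    (ha : inAZ a) :
    ((List.count (Char.ofNat i.toNat) (a :: l) : Nat) : Int)
      = ((List.count (Char.ofNat i.toNat) l : Nat) : Int) + (if i = (a.toNat : Int) then 1 else 0) := by
  by_cases h : Char.ofNat i.toNat = a
  · rw [if_pos ((ofNat_eq_iff i hi1 hi2 a ha).mp h), h, List.count_cons_self]
    push_cast; ring
  · rw [if_neg (fun he => h ((ofNat_eq_iff i hi1 hi2 a ha).mpr he))]
    simp [Ne.symm h]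

theorem sum_counts (ys : List Char) (hy : ∀ y ∈ ys, inAZ y) :
    ((PySem.List.pyRange 97 123 1).map
      (fun i => ((ys.count (Char.ofNat i.toNat)) : Int))).sum = (ys.length : Int) := by
  induction ys with
  | nil => simp
  | cons y ys ih =>
    have hyz := hy y (by simp)
    rw [sum_map_shift _ ((y.toNat : Int)) _
        (fun i => ((List.count (Char.ofNat i.toNat) ys : Nat) : Int))
        (fun i hi => by
          rw [PySem.List.mem_pyRange_one] at hi
          beta_reduce
          exact count_cons_indicator y ys i hi.1 hi.2 hyz),
      ih (fun y hy' => hy y (by simp [hy'])), count_range_eq_one y hyz]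
    simp

theorem azSum_nil_left (t2 : List Char) (hy : ∀ c ∈ t2, inAZ c) :
    azSum [] t2 = (t2.length : Int) := by
  unfold azSum
  rw [← sum_counts t2 hy]
  refine congrArg List.sum (List.map_congr_left fun i _ => ?_)
  beta_reduce
  rw [List.count_nil, abs_sub_comm]
  simp

theorem azSum_nil_right (t1 : List Char) (hx : ∀ c ∈ t1, inAZ c) :
    azSum t1 [] = (t1.length : Int) := by
  unfold azSum
  rw [← sum_counts t1 hx]
  refine congrArg List.sum (List.map_congr_left fun i _ => ?_)
  beta_reduce
  rw [List.count_nil]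
  simp

theorem azSum_cons_eq (y : Char) (xs ys : List Char) :
    azSum (y :: xs) (y :: ys) = azSum xs ys := by
  unfold azSum
  refine congrArg List.sum (List.map_congr_left fun i _ => ?_)
  beta_reduce
  rw [List.count_cons, List.count_cons]
  push_cast
  by_cases h : Char.ofNat i.toNat = y <;> simp [h]

theorem azSum_cons_lt (x y : Char) (xs ys : List Char)
    (hx : inAZ x) (h0 : List.count x (y :: ys) = 0) :
    azSum (x :: xs) (y :: ys) = 1 + azSum xs (y :: ys) := by
  unfold azSum
  rw [sum_map_shift _ ((x.toNat : Int)) _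
      (fun i => |((List.count (Char.ofNat i.toNat) xs : Nat) : Int)
                 - ((List.count (Char.ofNat i.toNat) (y :: ys) : Nat) : Int)|)
      (fun i hi => by
        rw [PySem.List.mem_pyRange_one] at hi
        beta_reduce
        by_cases h : Char.ofNat i.toNat = x
        · rw [if_pos ((ofNat_eq_iff i hi.1 hi.2 x hx).mp h), h, List.count_cons_self, h0]
          push_cast
          rw [abs_of_nonneg (by omega), abs_of_nonneg (by omega)]
          ring
        · rw [if_neg (fun he => h ((ofNat_eq_iff i hi.1 hi.2 x hx).mpr he))]
          simp [List.count_cons, Ne.symm h]),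
    count_range_eq_one x hx]
  ring

theorem azSum_cons_gt (x y : Char) (xs ys : List Char)
    (hy : inAZ y) (h0 : List.count y (x :: xs) = 0) :
    azSum (x :: xs) (y :: ys) = 1 + azSum (x :: xs) ys := by
  unfold azSum
  rw [sum_map_shift _ ((y.toNat : Int)) _
      (fun i => |((List.count (Char.ofNat i.toNat) (x :: xs) : Nat) : Int)
                 - ((List.count (Char.ofNat i.toNat) ys : Nat) : Int)|)
      (fun i hi => by
        rw [PySem.List.mem_pyRange_one] at hi
        beta_reduce
        by_cases h : Char.ofNat i.toNat = y
        · rw [if_pos ((ofNat_eq_iff i hi.1 hi.2 y hy).mp h), h, List.count_cons_self, h0]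
          push_cast
          rw [abs_of_nonpos (by omega), abs_of_nonpos (by omega)]
          ring
        · rw [if_neg (fun he => h ((ofNat_eq_iff i hi.1 hi.2 y hy).mpr he))]
          simp [List.count_cons, Ne.symm h]),
    count_range_eq_one y hy]
  ring

theorem not_mem_of_lt_head (c y : Char) (ys : List Char) (hy : (y :: ys).Pairwise (· ≤ ·))
    (hlt : c < y) : List.count c (y :: ys) = 0 := by
  rw [List.count_eq_zero]
  intro hmem
  rcases List.mem_cons.mp hmem with h | h
  · exact absurd h (ne_of_lt hlt)
  · exact absurd rfl (ne_of_lt (lt_of_lt_of_le hlt (List.rel_of_pairwise_cons hy h)))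

theorem mergeDel_eq (xs ys : List Char) :
    xs.Pairwise (· ≤ ·) → ys.Pairwise (· ≤ ·) →
    (∀ c ∈ xs, inAZ c) → (∀ c ∈ ys, inAZ c) →
    mergeDel xs ys = azSum xs ys := by
  induction xs, ys using mergeDel.induct with
  | case1 t2 =>
    intro _ _ _ hy
    rw [azSum_nil_left t2 hy]
    simp [mergeDel]
  | case2 x xs =>
    intro _ _ hx _
    rw [azSum_nil_right (x :: xs) hx]
    simp [mergeDel]
  | case3 xs y ys ih =>
    intro hx hy hxa hya
    rw [azSum_cons_eq,
      ← ih hx.of_cons hy.of_cons (fun c hc => hxa c (by simp [hc])) (fun c hc => hya c (by simp [hc]))]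
    simp [mergeDel]
  | case4 x xs y ys hne hlt ih =>
    intro hx hy hxa hya
    rw [azSum_cons_lt x y xs ys (hxa x (by simp)) (not_mem_of_lt_head x y ys hy hlt),
      ← ih hx.of_cons hy (fun c hc => hxa c (by simp [hc])) hya]
    simp [mergeDel, hne, hlt]
  | case5 x xs y ys hne hnlt ih =>
    intro hx hy hxa hya
    have hgt : y < x := lt_of_le_of_ne (le_of_not_gt hnlt) (fun h => hne h.symm)
    rw [azSum_cons_gt x y xs ys (hya y (by simp)) (not_mem_of_lt_head y x xs hx hgt),
      ← ih hx hy.of_cons hxa (fun c hc => hya c (by simp [hc]))]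
    simp [mergeDel, hne, hnlt]

theorem inAZ_iff (c : Char) : ('a' ≤ c ∧ c ≤ 'z') ↔ inAZ c := by
  unfold inAZ
  rw [Char.le_def, Char.le_def, UInt32.le_iff_toNat_le, UInt32.le_iff_toNat_le]
  exact Iff.rfl

theorem mem_sorted_azFilter (s : String) (c : Char)
    (h : c ∈ PySem.List.sorted (azFilter s) (fun c => c) false) : inAZ c := by
  rw [PySem.List.mem_sorted] at h
  unfold azFilter at h
  have := List.of_mem_filter h
  exact (inAZ_iff c).mp (by simpa using this)

theorem count_sorted_azFilter (s : String) (c : Char) (hc : inAZ c) :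
    List.count c (PySem.List.sorted (azFilter s) (fun c => c) false) = List.count c s.toList := by
  rw [(PySem.List.sorted_perm (azFilter s) (fun c => c) false).count_eq]
  unfold azFilter
  rw [List.count_filter]
  simp [(inAZ_iff c).mpr hc]

theorem makeAnagramS_eq_azSum (s1 s2 : String) :
    makeAnagramS s1 s2 = azSum s1.toList s2.toList := by
  unfold makeAnagramS azSum
  rw [PySem.List.foldl_add]
  simp [PySem.Dict.getD_counter]

-- ===== VERDICT (by name: the statement is the Claim_ definition above) =====
theorem makeAnagramS_spec : Claim_equal_makeAnagramS := by
  intro s1 s2 _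
  unfold Spec_makeAnagramS makeAnagramS_alt
  rw [makeAnagramS_eq_azSum]
  rw [mergeDel_eq _ _
    (PySem.List.sorted_pairwise (azFilter s1) (fun c => c))
    (PySem.List.sorted_pairwise (azFilter s2) (fun c => c))
    (fun c hc => mem_sorted_azFilter s1 c hc)
    (fun c hc => mem_sorted_azFilter s2 c hc)]
  unfold azSum
  refine congrArg List.sum (List.map_congr_left (fun i hi => ?_))
  rw [PySem.List.mem_pyRange_one] at hi
  have hz : inAZ (Char.ofNat i.toNat) := by
    unfold inAZ
    rw [char_toNat_ofNat i.toNat (by omega)]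
    omega
  rw [count_sorted_azFilter s1 _ hz, count_sorted_azFilter s2 _ hz]
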